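-- pv_equiv track=rewrite | github.com/romanovacca/detectioncollection | src/core/models/internal/yolo/v3/darknet.py | _parse_cfg
-- ===== SOURCE A (Python) =====
-- def _parse_cfg(lines):
--     """ creates the blocks from the config file
--
--     It uses a placeholder variable that stores all the values from one block until the next block is detected.
--     Then it writes the completed block to the block list, cleans the placeholder block and fills it with the next block
--     and repeats the cycle.
--     """
--     block = {}
--     blocks = []
--
--     for line in lines:
--         # "[" marks the start of a new block
--         if line[0] == "[":
--             #
--             # If block is not empty, implies it is storing values of previous block.
--             if len(block) != 0:
--                 # add it the blocks list
--                 blocks.append(block)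
--                 # re-init the block
--                 block = {}
--             block["type"] = line[1:-1].rstrip()
--         else:
--             key, value = line.split("=")
--             block[key.rstrip()] = value.lstrip()
--     blocks.append(block)
--
--     return blocks
-- ===== SOURCE B (Python) =====
-- def _parse_cfg(lines):
--     # Two passes: partition lines into block groups, then build each dict.
--     groups = []
--     cur = []
--     for line in lines:
--         if line[0] == "[" and cur:
--             groups.append(cur)
--             cur = []
--         cur.append(line)
--     groups.append(cur)
--
--     blocks = []
--     for group in groups:
--         block = {}
--         for line in group:
--             if line[0] == "[":
--                 block["type"] = line[1:-1].rstrip()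
--             else:
--                 key, value = line.split("=")
--                 block[key.rstrip()] = value.lstrip()
--         blocks.append(block)
--     return blocks
-- ===== Notes on version B (the rewrite author's own statement) =====
-- stated objective: alternative
-- what changed: Replaces A's single stateful loop carrying a placeholder dict by two passes: first partition the lines into per-block groups, then build each block dict independently from its group.
-- outside the precondition, e.g. on _parse_cfg(['']): A raises IndexError, B raises IndexError; on _parse_cfg(['a=b=c']): A raises ValueError, B raises ValueError
import Mathlib
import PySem

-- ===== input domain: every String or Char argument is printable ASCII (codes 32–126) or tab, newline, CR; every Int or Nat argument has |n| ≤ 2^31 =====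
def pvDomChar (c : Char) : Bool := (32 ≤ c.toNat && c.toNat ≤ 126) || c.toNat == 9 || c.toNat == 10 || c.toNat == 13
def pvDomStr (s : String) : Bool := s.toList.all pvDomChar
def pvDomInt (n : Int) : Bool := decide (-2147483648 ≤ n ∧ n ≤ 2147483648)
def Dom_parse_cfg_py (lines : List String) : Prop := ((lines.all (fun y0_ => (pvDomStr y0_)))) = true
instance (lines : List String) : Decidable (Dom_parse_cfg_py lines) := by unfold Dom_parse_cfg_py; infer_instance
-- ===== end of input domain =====

-- B replaces A's single stateful loop by two passes (group the lines per block, then build each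
-- block dict independently); same return value, objective: alternative decomposition.

-- ===== PORT A =====
-- A's loop body: state is (block, blocks).
def pvA_step (s : PySem.Dict String String × List (PySem.Dict String String)) (line : String) :
    PySem.Dict String String × List (PySem.Dict String String) :=
  if PySem.Str.pyGet? line 0 = some '[' then
    let s := if s.1.size ≠ 0 then ((PySem.Dict.empty : PySem.Dict String String), s.2 ++ [s.1]) else s
    (s.1.insert "type" (PySem.Str.rstrip (PySem.Str.slice line (some 1) (some (-1)))), s.2)
  else
    match PySem.Str.split? line "=" with
    | some [key, value] => (s.1.insert (PySem.Str.rstrip key) (PySem.Str.lstrip value), s.2)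
    | _ => (s.1.insert "" "", s.2)  -- unreachable inside Pre_: Python raises (ValueError/IndexError) here

def parse_cfg_py (lines : List String) : List (List (String × String)) :=
  let s := lines.foldl pvA_step ((PySem.Dict.empty : PySem.Dict String String), [])
  (s.2 ++ [s.1]).map PySem.Dict.items

-- ===== PORT B =====
-- dict update performed for one line of a group (second pass's inner loop body)
def pvB_upd (block : PySem.Dict String String) (line : String) : PySem.Dict String String :=
  if PySem.Str.pyGet? line 0 = some '[' then
    block.insert "type" (PySem.Str.rstrip (PySem.Str.slice line (some 1) (some (-1))))
  else
    match PySem.Str.split? line "=" with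
    | some [key, value] => block.insert (PySem.Str.rstrip key) (PySem.Str.lstrip value)
    | _ => block.insert "" ""  -- unreachable inside Pre_: Python raises here

-- first pass's loop body: state is (groups, cur)
def pvB_group (s : List (List String) × List String) (line : String) :
    List (List String) × List String :=
  if PySem.Str.pyGet? line 0 = some '[' ∧ s.2 ≠ [] then (s.1 ++ [s.2], [line])
  else (s.1, s.2 ++ [line])

def pvB_build (group : List String) : List (String × String) :=
  (group.foldl pvB_upd (PySem.Dict.empty : PySem.Dict String String)).items

def parse_cfg_py_alt (lines : List String) : List (List (String × String)) :=
  let s := lines.foldl pvB_group ([], [])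
  (s.1 ++ [s.2]).map pvB_build

-- ===== PRECONDITION & SPEC =====
-- Pre_ excludes exactly the lines on which Python A raises: an empty line (IndexError on line[0])
-- and a non-'[' line whose number of '=' is not exactly one (ValueError on the unpacking split).
def Pre_parse_cfg_py (lines : List String) : Prop :=
  ∀ line ∈ lines, PySem.Str.pyGet? line 0 = some '[' ∨ PySem.Str.count line "=" = 1
instance (lines : List String) : Decidable (Pre_parse_cfg_py lines) := by
  unfold Pre_parse_cfg_py; infer_instance

def pvWitness_parse_cfg_py : List String := ["[net]", "batch=64", "[conv ]", "size = 3"]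

def Spec_parse_cfg_py (lines : List String) (out : List (List (String × String))) : Prop :=
  out = parse_cfg_py_alt lines
instance (lines : List String) (out : List (List (String × String))) : Decidable (Spec_parse_cfg_py lines out) := by
  unfold Spec_parse_cfg_py; infer_instance

-- ===== CLAIM (what is proved, stated in full; the proofs are below) =====
def Claim_equal_parse_cfg_py : Prop :=
  ∀ (lines : List String), Dom_parse_cfg_py lines → Pre_parse_cfg_py lines →
    Spec_parse_cfg_py lines (parse_cfg_py lines)

-- ===== LEMMAS AND PROOFS =====

-- every dict update of either port is an insert, so the resulting block is never empty
lemma pv_insert_size_ne (d : PySem.Dict String String) (k v : String) :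
    (d.insert k v).size ≠ 0 := by
  rw [PySem.Dict.size_insert]
  split
  · rename_i hc
    cases d with
    | mk its =>
      cases its with
      | nil => simp at hc
      | cons a b => simp [PySem.Dict.size]
  · omega

lemma pvB_upd_size_ne (b : PySem.Dict String String) (line : String) :
    (pvB_upd b line).size ≠ 0 := by
  unfold pvB_upd
  split
  · exact pv_insert_size_ne _ _ _
  · split <;> exact pv_insert_size_ne _ _ _

lemma pvB_upd_pos (b : PySem.Dict String String) (line : String)
    (h : PySem.Str.pyGet? line 0 = some '[') :
    pvB_upd b line
      = b.insert "type" (PySem.Str.rstrip (PySem.Str.slice line (some 1) (some (-1)))) := by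
  unfold pvB_upd; rw [if_pos h]

-- A's loop body, written with B's dict-update helper
lemma pvA_step_eq (b : PySem.Dict String String) (bs : List (PySem.Dict String String))
    (line : String) :
    pvA_step (b, bs) line =
      if PySem.Str.pyGet? line 0 = some '[' ∧ b.size ≠ 0 then
        (pvB_upd PySem.Dict.empty line, bs ++ [b])
      else (pvB_upd b line, bs) := by
  unfold pvA_step
  by_cases hb : PySem.Str.pyGet? line 0 = some '['
  · by_cases hs : b.size ≠ 0
    · rw [if_pos hb, if_pos (show ((b, bs).1.size ≠ 0) from hs), if_pos ⟨hb, hs⟩,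
        pvB_upd_pos _ _ hb]
    · rw [if_pos hb, if_neg (show ¬((b, bs).1.size ≠ 0) from hs), if_neg (by tauto),
        pvB_upd_pos _ _ hb]
  · rw [if_neg hb, if_neg (by tauto)]
    unfold pvB_upd
    rw [if_neg hb]
    split <;> rfl

-- the loop invariant: A's running (block, blocks) correspond to B's (groups, cur)
lemma pv_main (rest : List String) :
    ∀ (b : PySem.Dict String String) (bs : List (PySem.Dict String String))
      (gs : List (List String)) (cur : List String),
      b = cur.foldl pvB_upd PySem.Dict.empty →
      (b.size ≠ 0 ↔ cur ≠ []) →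
      bs = gs.map (fun g => g.foldl pvB_upd PySem.Dict.empty) →
      (let sA := rest.foldl pvA_step (b, bs); sA.2 ++ [sA.1]) =
        ((let sB := rest.foldl pvB_group (gs, cur); sB.1 ++ [sB.2]).map
          (fun g => g.foldl pvB_upd PySem.Dict.empty)) := by
  induction rest with
  | nil =>
    intro b bs gs cur hb hsz hbs
    simp [hb, hbs]
  | cons line rest ih =>
    intro b bs gs cur hb hsz hbs
    simp only [List.foldl_cons]
    rw [pvA_step_eq]
    by_cases hc : PySem.Str.pyGet? line 0 = some '[' ∧ b.size ≠ 0
    · rw [if_pos hc]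
      have hcur : cur ≠ [] := hsz.mp hc.2
      rw [show pvB_group (gs, cur) line = (gs ++ [cur], [line]) from by
        unfold pvB_group; rw [if_pos ⟨hc.1, hcur⟩]]
      exact ih _ _ _ _ rfl
        ⟨fun _ => by simp, fun _ => pvB_upd_size_ne _ _⟩
        (by simp [hbs, hb])
    · rw [if_neg hc]
      rw [show pvB_group (gs, cur) line = (gs, cur ++ [line]) from by
        unfold pvB_group
        exact if_neg (fun h => hc ⟨h.1, hsz.mpr h.2⟩)]
      exact ih _ _ _ _ (by simp [hb])
        ⟨fun _ => by simp, fun _ => pvB_upd_size_ne _ _⟩ hbs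

-- ===== VERDICT (by name: the statement is the Claim_ definition above) =====
theorem parse_cfg_py_spec : Claim_equal_parse_cfg_py := by
  intro lines _ _
  unfold Spec_parse_cfg_py parse_cfg_py parse_cfg_py_alt
  have h := pv_main lines PySem.Dict.empty [] [] [] rfl
    (by simp [show (PySem.Dict.empty : PySem.Dict String String).size = 0 from rfl])
    rfl
  simp only at h ⊢
  rw [h, List.map_map]
  rfl
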